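-- pv_equiv track=rewrite | github.com/mrtsfn601/all-coding-challenges | algoexpert/GenerateDocument.py | generateDocument
-- ===== SOURCE A (Python) =====
-- def generateDocument(characters, document):
--     char_count = {}
--
--     for c in characters:
--         char_count[c] = char_count.get(c, 0) + 1
--
--     for c in document:
--         if c not in char_count or char_count[c] == 0:
--             return False
--         char_count[c] -= 1
--
--     return True
-- ===== SOURCE B (Python) =====
-- def generateDocument(characters, document):
--     # count-and-compare: each distinct document character must be at least
--     # as frequent in characters as in document (no decrementing counter)
--     return all(characters.count(c) >= document.count(c) for c in set(document))
-- ===== Notes on version B (the rewrite author's own statement) =====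
-- stated objective: simpler
-- what changed: Replaces the dict-building count-then-decrement loop with early return by a one-line threshold comparison: for each distinct document character, its count in characters must be >= its count in document.
import Mathlib
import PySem

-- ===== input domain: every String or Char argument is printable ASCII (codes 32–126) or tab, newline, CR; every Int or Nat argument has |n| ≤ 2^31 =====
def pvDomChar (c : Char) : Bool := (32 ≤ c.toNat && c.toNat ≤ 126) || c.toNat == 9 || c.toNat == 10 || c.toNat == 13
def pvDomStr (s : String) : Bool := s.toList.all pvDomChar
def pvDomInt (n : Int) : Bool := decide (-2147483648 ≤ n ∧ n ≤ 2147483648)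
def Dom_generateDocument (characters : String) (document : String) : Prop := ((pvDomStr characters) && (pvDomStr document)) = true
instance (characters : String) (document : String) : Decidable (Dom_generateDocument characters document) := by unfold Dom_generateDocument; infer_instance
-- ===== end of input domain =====

-- B replaces A's count-then-decrement dict loop by a per-distinct-character threshold comparison (simpler).

-- ===== PORT A =====
-- the second loop of A: consume the document, decrementing the counter, with early return False
def genGo (d : PySem.Dict Char Int) : List Char → Bool
  | [] => true
  | c :: rest =>
    if !d.contains c || d.getD c 0 == 0 then false
    else genGo (d.insert c (d.getD c 0 - 1)) rest

def generateDocument (characters : String) (document : String) : Bool :=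
  let charCount := characters.toList.foldl (fun d c => d.insert c (d.getD c 0 + 1)) PySem.Dict.empty
  genGo charCount document.toList

-- ===== PORT B =====
-- all(characters.count(c) >= document.count(c) for c in set(document));
-- s.count(c) for a single character is the count of that code point in s.toList (exact)
def generateDocument_alt (characters : String) (document : String) : Bool :=
  (PySem.Set.ofList document.toList).all
    (fun c => decide (document.toList.count c ≤ characters.toList.count c))

-- ===== PRECONDITION & SPEC =====
def Spec_generateDocument (characters : String) (document : String) (out : Bool) : Prop := out = generateDocument_alt characters document
instance (characters : String) (document : String) (out : Bool) : Decidable (Spec_generateDocument characters document out) := by unfold Spec_generateDocument; infer_instance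

-- ===== CLAIM (what is proved, stated in full; the proofs are below) =====
def Claim_equal_generateDocument : Prop := ∀ (characters : String) (document : String), Dom_generateDocument characters document → Spec_generateDocument characters document (generateDocument characters document)

-- ===== LEMMAS AND PROOFS =====

-- loop invariant: with d holding cs.count x - p.count x for every x (p = consumed prefix),
-- genGo succeeds iff every character's total demand stays within supply
lemma genGo_spec (cs : List Char) : ∀ (ds : List Char) (d : PySem.Dict Char Int) (p : List Char),
    (∀ x, d.getD x 0 = (cs.count x : Int) - (p.count x : Int)) →
    (∀ x, d.contains x = decide (x ∈ cs)) →
    (∀ x, p.count x ≤ cs.count x) →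
    (genGo d ds = true ↔ ∀ x, ds.count x + p.count x ≤ cs.count x) := by
  intro ds
  induction ds with
  | nil =>
    intro d p _ _ h3
    simp [genGo]
    intro x; exact h3 x
  | cons c rest ih =>
    intro d p h1 h2 h3
    by_cases hc : c ∈ cs
    · by_cases hz : d.getD c 0 = 0
      · -- supply exhausted for c: loop returns false, and the RHS fails at x := c
        have : genGo d (c :: rest) = false := by
          simp [genGo, hz]
        rw [this]
        simp only [Bool.false_eq_true, false_iff, not_forall, not_le]
        refine ⟨c, ?_⟩
        have := h1 c
        rw [hz] at this
        have hcc : (cs.count c : Int) = (p.count c : Int) := by omega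
        simp only [List.count_cons_self]
        omega
      · -- consume one c and recurse with prefix c :: p
        have hcont : d.contains c = true := by rw [h2 c]; simp [hc]
        have hstep : genGo d (c :: rest) = genGo (d.insert c (d.getD c 0 - 1)) rest := by
          simp [genGo, hcont, hz]
        have hlt : p.count c < cs.count c := by
          have := h1 c
          have := h3 c
          omega
        rw [hstep, ih (d.insert c (d.getD c 0 - 1)) (c :: p) ?_ ?_ ?_]
        · constructor
          · intro h x
            have := h x
            simp only [List.count_cons] at *
            omega
          · intro h x
            have := h x
            simp only [List.count_cons] at *
            omega
        · intro x
          rw [PySem.Dict.getD_insert]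
          by_cases hx : x = c
          · subst hx
            have := h1 x
            rw [if_pos rfl, List.count_cons_self]
            push_cast
            omega
          · rw [if_neg hx, List.count_cons_of_ne (Ne.symm hx)]
            exact h1 x
        · intro x
          rw [PySem.Dict.contains_insert, h2 x]
          by_cases hx : x = c
          · subst hx; simp [hc]
          · simp [hx]
        · intro x
          by_cases hx : x = c
          · subst hx; rw [List.count_cons_self]; omega
          · rw [List.count_cons_of_ne (Ne.symm hx)]; exact h3 x
    · -- c not among the available characters: loop returns false, RHS fails at c
      have hcont : d.contains c = false := by rw [h2 c]; simp [hc]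
      have : genGo d (c :: rest) = false := by
        simp [genGo, hcont]
      rw [this]
      simp only [Bool.false_eq_true, false_iff, not_forall, not_le]
      refine ⟨c, ?_⟩
      have hcs : cs.count c = 0 := List.count_eq_zero.mpr hc
      have hp : p.count c = 0 := by have := h3 c; omega
      simp [List.count_cons_self, hcs, hp]

lemma alt_iff (cs ds : List Char) :
    ((PySem.Set.ofList ds).all (fun c => decide (ds.count c ≤ cs.count c)) = true)
      ↔ ∀ x, ds.count x ≤ cs.count x := by
  rw [List.all_eq_true]
  constructor
  · intro h x
    by_cases hx : x ∈ ds
    · have := h x (by rw [PySem.Set.mem_ofList]; exact hx)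
      simpa using this
    · simp [List.count_eq_zero.mpr hx]
  · intro h x _
    simpa using h x

-- ===== VERDICT (by name: the statement is the Claim_ definition above) =====
theorem generateDocument_spec : Claim_equal_generateDocument := by
  intro characters document _
  unfold Spec_generateDocument generateDocument generateDocument_alt
  rw [Bool.eq_iff_iff]
  rw [PySem.Dict.foldl_insert_getD_add_one_eq_counter]
  rw [genGo_spec characters.toList document.toList (PySem.Dict.counter characters.toList) []
      (fun x => by simp [PySem.Dict.getD_counter])
      (fun x => by rw [PySem.Dict.contains_counter]; simp)
      (fun x => by simp)]
  rw [alt_iff]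
  constructor
  · intro h x; simpa using h x
  · intro h x; simpa using h x
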